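-- pv_equiv track=rewrite | github.com/K-YUTAA/asset_placer_isaac | experiments/src/task_points.py | _snap_cell_to_free
-- ===== SOURCE A (Python) =====
-- from typing import Any, Dict, List, Optional, Sequence, Tuple
--
-- Grid = List[List[bool]]
--
-- Cell = Tuple[int, int]
--
-- def _snap_cell_to_free(cell: Cell, free_mask: Grid, max_radius_cells: int) -> Tuple[Cell, bool]:
--     ny = len(free_mask)
--     nx = len(free_mask[0]) if ny > 0 else 0
--     if nx <= 0 or ny <= 0:
--         return cell, False
--
--     ix0, iy0 = cell
--     if 0 <= ix0 < nx and 0 <= iy0 < ny and free_mask[iy0][ix0]: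
--         return cell, False
--
--     r = max(0, int(max_radius_cells))
--     best: Optional[Cell] = None
--     best_d2 = float("inf")
--
--     for dy in range(-r, r + 1):
--         for dx in range(-r, r + 1):
--             d2 = dx * dx + dy * dy
--             if d2 == 0 or d2 > r * r:
--                 continue
--             ix = ix0 + dx
--             iy = iy0 + dy
--             if ix < 0 or ix >= nx or iy < 0 or iy >= ny:
--                 continue
--             if not free_mask[iy][ix]:
--                 continue
--             if d2 < best_d2 or (d2 == best_d2 and best is not None and (iy, ix) < (best[1], best[0])):
--                 best = (ix, iy)
--                 best_d2 = d2
--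
--     if best is None:
--         return cell, False
--     return best, True
-- ===== SOURCE B (Python) =====
-- def _snap_cell_to_free(cell, free_mask, max_radius_cells):
--     ny = len(free_mask)
--     nx = len(free_mask[0]) if ny > 0 else 0
--     if nx <= 0 or ny <= 0:
--         return cell, False
--
--     ix0, iy0 = cell
--     if 0 <= ix0 < nx and 0 <= iy0 < ny and free_mask[iy0][ix0]:
--         return cell, False
--
--     r = max(0, int(max_radius_cells))
--     offsets = [(dy, dx)
--                for dy in range(-r, r + 1)
--                for dx in range(-r, r + 1)
--                if 0 < dx * dx + dy * dy <= r * r]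
--     offsets.sort(key=lambda o: (o[0] * o[0] + o[1] * o[1], o))
--     for dy, dx in offsets:
--         ix, iy = ix0 + dx, iy0 + dy
--         if 0 <= ix < nx and 0 <= iy < ny and free_mask[iy][ix]:
--             return (ix, iy), True
--     return cell, False
-- ===== Notes on version B (the rewrite author's own statement) =====
-- stated objective: simpler
-- what changed: A's nested dy/dx loops with best/best_d2 min-tracking state and a hand-written tie-break are replaced by building the offset list once, sorting it stably by (distance², (dy, dx)), and returning the first in-bounds free cell of a single scan.
import Mathlib
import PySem

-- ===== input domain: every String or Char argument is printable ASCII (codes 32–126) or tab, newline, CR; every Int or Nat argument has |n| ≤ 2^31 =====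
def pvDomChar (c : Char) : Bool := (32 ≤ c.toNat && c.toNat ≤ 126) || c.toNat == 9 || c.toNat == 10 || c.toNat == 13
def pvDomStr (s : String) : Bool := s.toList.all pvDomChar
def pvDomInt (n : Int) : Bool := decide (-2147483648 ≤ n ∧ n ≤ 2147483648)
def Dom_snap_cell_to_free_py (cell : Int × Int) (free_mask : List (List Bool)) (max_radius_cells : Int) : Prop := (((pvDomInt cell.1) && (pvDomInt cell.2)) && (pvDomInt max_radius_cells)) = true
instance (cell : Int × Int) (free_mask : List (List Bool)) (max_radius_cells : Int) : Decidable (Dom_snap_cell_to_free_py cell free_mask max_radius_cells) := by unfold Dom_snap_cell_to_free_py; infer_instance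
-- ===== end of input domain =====

-- B replaces A's nested min-tracking loop by a precomputed offset list sorted by
-- (distance², dy, dx) and a single first-match scan; objective: simpler (no speed claim).

-- shared helper: free_mask[iy][ix] (both Pythons do this access; exact under Pre_,
-- which guarantees every probed index is inside its row)
def pvGridAt (g : List (List Bool)) (iy ix : Int) : Bool :=
  (PySem.List.pyGet? ((PySem.List.pyGet? g iy).getD []) ix).getD false

-- ===== PORT A =====
def snap_cell_to_free_py (cell : Int × Int) (free_mask : List (List Bool)) (max_radius_cells : Int) : (Int × Int) × Bool :=
  let ny : Int := free_mask.length
  let nx : Int := if ny > 0 then (((PySem.List.pyGet? free_mask 0).getD []).length : Int) else 0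
  if nx ≤ 0 ∨ ny ≤ 0 then (cell, false)
  else
    let ix0 := cell.1
    let iy0 := cell.2
    if 0 ≤ ix0 ∧ ix0 < nx ∧ 0 ≤ iy0 ∧ iy0 < ny ∧ pvGridAt free_mask iy0 ix0 then (cell, false)
    else
      let r := max 0 max_radius_cells
      let st := (PySem.List.pyRange (-r) (r+1) 1).foldl (fun st dy =>
        (PySem.List.pyRange (-r) (r+1) 1).foldl (fun st dx =>
          let best := st.1
          let best_d2 := st.2
          let d2 := dx*dx + dy*dy
          if d2 = 0 ∨ d2 > r*r then (best, best_d2)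
          else
            let ix := ix0 + dx
            let iy := iy0 + dy
            if ix < 0 ∨ ix ≥ nx ∨ iy < 0 ∨ iy ≥ ny then (best, best_d2)
            else if ¬ pvGridAt free_mask iy ix then (best, best_d2)
            else if ((match best_d2 with | none => true | some v => decide (d2 < v)) ||
                     ((match best_d2 with | none => false | some v => decide (d2 = v)) &&
                      (match best with | none => false
                                       | some b => decide (iy < b.2 ∨ (iy = b.2 ∧ ix < b.1)))))
                 then (some (ix, iy), some d2)
            else (best, best_d2)) st)
        ((none, none) : Option (Int × Int) × Option Int)
      match st.1 with
      | none => (cell, false)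
      | some b => (b, true)

-- ===== PORT B =====
-- Source B sorts by the Python tuple key (d², (dy, dx)); ported as a stable merge sort by
-- the order-isomorphic Int key d²·B² + (dy+r)·B + (dx+r) with B = 2r+1 (exact: the key
-- is injective on the list, since |dy|, |dx| ≤ r there)
def snap_cell_to_free_py_alt (cell : Int × Int) (free_mask : List (List Bool)) (max_radius_cells : Int) : (Int × Int) × Bool :=
  let ny : Int := free_mask.length
  let nx : Int := if ny > 0 then (((PySem.List.pyGet? free_mask 0).getD []).length : Int) else 0
  if nx ≤ 0 ∨ ny ≤ 0 then (cell, false)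
  else
    let ix0 := cell.1
    let iy0 := cell.2
    if 0 ≤ ix0 ∧ ix0 < nx ∧ 0 ≤ iy0 ∧ iy0 < ny ∧ pvGridAt free_mask iy0 ix0 then (cell, false)
    else
      let r := max 0 max_radius_cells
      let offsets := ((PySem.List.pyRange (-r) (r+1) 1).flatMap (fun dy =>
          (PySem.List.pyRange (-r) (r+1) 1).map (fun dx => (dy, dx)))).filter
          (fun o => decide (0 < o.2*o.2 + o.1*o.1 ∧ o.2*o.2 + o.1*o.1 ≤ r*r))
      let B := 2*r + 1
      let s := offsets.mergeSort (fun o1 o2 =>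
          decide ((o1.2*o1.2 + o1.1*o1.1)*B*B + (o1.1+r)*B + (o1.2+r) ≤
                  (o2.2*o2.2 + o2.1*o2.1)*B*B + (o2.1+r)*B + (o2.2+r)))
      match s.find? (fun o =>
          decide (0 ≤ ix0 + o.2 ∧ ix0 + o.2 < nx ∧ 0 ≤ iy0 + o.1 ∧ iy0 + o.1 < ny) &&
          pvGridAt free_mask (iy0 + o.1) (ix0 + o.2)) with
      | none => (cell, false)
      | some o => ((ix0 + o.2, iy0 + o.1), true)

-- ===== PRECONDITION & SPEC =====
-- Pre_ excludes exactly the inputs on which A raises IndexError: a ragged grid whose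
-- probed cells (the start cell, or any in-bounds cell within radius r when the search
-- runs) fall beyond the end of their own (shorter-than-first) row.
def Pre_snap_cell_to_free_py (cell : Int × Int) (free_mask : List (List Bool)) (max_radius_cells : Int) : Prop :=
  let ny : Int := free_mask.length
  let nx : Int := if ny > 0 then (((PySem.List.pyGet? free_mask 0).getD []).length : Int) else 0
  let ix0 := cell.1
  let iy0 := cell.2
  let r := max 0 max_radius_cells
  ¬ (nx ≤ 0 ∨ ny ≤ 0) →
    ((0 ≤ ix0 ∧ ix0 < nx ∧ 0 ≤ iy0 ∧ iy0 < ny →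
        ix0 < (((PySem.List.pyGet? free_mask iy0).getD []).length : Int)) ∧
     (¬ (0 ≤ ix0 ∧ ix0 < nx ∧ 0 ≤ iy0 ∧ iy0 < ny ∧ pvGridAt free_mask iy0 ix0) →
        ∀ j ∈ List.range free_mask.length, ∀ i ∈ List.range ((PySem.List.pyGet? free_mask 0).getD []).length,
          (0 < ((i : Int) - ix0)*((i : Int) - ix0) + ((j : Int) - iy0)*((j : Int) - iy0) ∧
           ((i : Int) - ix0)*((i : Int) - ix0) + ((j : Int) - iy0)*((j : Int) - iy0) ≤ r*r) →
          (i : Int) < (((PySem.List.pyGet? free_mask (j : Int)).getD []).length : Int)))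
instance (cell : Int × Int) (free_mask : List (List Bool)) (max_radius_cells : Int) : Decidable (Pre_snap_cell_to_free_py cell free_mask max_radius_cells) := by unfold Pre_snap_cell_to_free_py; infer_instance

def pvWitness_snap_cell_to_free_py : (Int × Int) × List (List Bool) × Int := ((0, 0), [[false, false], [true, false]], 1)

def Spec_snap_cell_to_free_py (cell : Int × Int) (free_mask : List (List Bool)) (max_radius_cells : Int) (out : (Int × Int) × Bool) : Prop := out = snap_cell_to_free_py_alt cell free_mask max_radius_cells
instance (cell : Int × Int) (free_mask : List (List Bool)) (max_radius_cells : Int) (out : (Int × Int) × Bool) : Decidable (Spec_snap_cell_to_free_py cell free_mask max_radius_cells out) := by unfold Spec_snap_cell_to_free_py; infer_instance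

-- ===== CLAIM (what is proved, stated in full; the proofs are below) =====
def Claim_equal_snap_cell_to_free_py : Prop := ∀ (cell : Int × Int) (free_mask : List (List Bool)) (max_radius_cells : Int), Dom_snap_cell_to_free_py cell free_mask max_radius_cells → Pre_snap_cell_to_free_py cell free_mask max_radius_cells → Spec_snap_cell_to_free_py cell free_mask max_radius_cells (snap_cell_to_free_py cell free_mask max_radius_cells)

-- ===== LEMMAS AND PROOFS =====

-- proof-side mirrors of the two loop bodies
def pvD2 (o : Int × Int) : Int := o.2*o.2 + o.1*o.1

def pvE (r : Int) (o : Int × Int) : Int :=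
  (o.2*o.2 + o.1*o.1)*(2*r+1)*(2*r+1) + (o.1+r)*(2*r+1) + (o.2+r)

def pvLe (r : Int) (a b : Int × Int) : Bool := decide (pvE r a ≤ pvE r b)

def pvBnd (r : Int) (o : Int × Int) : Prop := -r ≤ o.1 ∧ o.1 ≤ r ∧ -r ≤ o.2 ∧ o.2 ≤ r

def pvL0 (r : Int) : List (Int × Int) :=
  (PySem.List.pyRange (-r) (r+1) 1).flatMap (fun dy =>
    (PySem.List.pyRange (-r) (r+1) 1).map (fun dx => (dy, dx)))

def pvPref (r : Int) (o : Int × Int) : Bool :=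
  decide (0 < o.2*o.2 + o.1*o.1 ∧ o.2*o.2 + o.1*o.1 ≤ r*r)

def pvGood (mask : List (List Bool)) (nx ny ix0 iy0 : Int) (o : Int × Int) : Bool :=
  decide (0 ≤ ix0 + o.2 ∧ ix0 + o.2 < nx ∧ 0 ≤ iy0 + o.1 ∧ iy0 + o.1 < ny) &&
  pvGridAt mask (iy0 + o.1) (ix0 + o.2)

def pvUpd (ix0 iy0 : Int) (st : Option (Int × Int) × Option Int) (o : Int × Int) :
    Option (Int × Int) × Option Int :=
  if ((match st.2 with | none => true | some v => decide (o.2*o.2 + o.1*o.1 < v)) ||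
      ((match st.2 with | none => false | some v => decide (o.2*o.2 + o.1*o.1 = v)) &&
       (match st.1 with | none => false
                        | some b => decide (iy0 + o.1 < b.2 ∨ (iy0 + o.1 = b.2 ∧ ix0 + o.2 < b.1)))))
  then (some (ix0 + o.2, iy0 + o.1), some (o.2*o.2 + o.1*o.1)) else st

def pvStepA (mask : List (List Bool)) (nx ny ix0 iy0 r : Int)
    (st : Option (Int × Int) × Option Int) (o : Int × Int) :
    Option (Int × Int) × Option Int :=
  let best := st.1
  let best_d2 := st.2
  let d2 := o.2*o.2 + o.1*o.1
  if d2 = 0 ∨ d2 > r*r then (best, best_d2)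
  else
    let ix := ix0 + o.2
    let iy := iy0 + o.1
    if ix < 0 ∨ ix ≥ nx ∨ iy < 0 ∨ iy ≥ ny then (best, best_d2)
    else if ¬ pvGridAt mask iy ix then (best, best_d2)
    else if ((match best_d2 with | none => true | some v => decide (d2 < v)) ||
             ((match best_d2 with | none => false | some v => decide (d2 = v)) &&
              (match best with | none => false
                               | some b => decide (iy < b.2 ∨ (iy = b.2 ∧ ix < b.1)))))
         then (some (ix, iy), some d2)
    else (best, best_d2)

def pvMin (r : Int) (b : Int × Int) (l : List (Int × Int)) : Int × Int :=
  l.foldl (fun b c => if pvE r c < pvE r b then c else b) b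

-- nested loop over a product = one loop over the flattened pair list
theorem pvFoldl_prod {α β γ : Type} (l1 : List β) (l2 : List γ) (f : α → β × γ → α)
    (init : α) :
    l1.foldl (fun s b => l2.foldl (fun s c => f s (b, c)) s) init
      = (l1.flatMap (fun b => l2.map (fun c => (b, c)))).foldl f init := by
  induction l1 generalizing init with
  | nil => rfl
  | cons b t ih => simp [List.foldl_append, List.foldl_map, ih]

theorem pvStepA_shape (mask : List (List Bool)) (nx ny ix0 iy0 r : Int)
    (st : Option (Int × Int) × Option Int) (o : Int × Int) :
    pvStepA mask nx ny ix0 iy0 r st o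
      = if (pvPref r o && pvGood mask nx ny ix0 iy0 o) then pvUpd ix0 iy0 st o else st := by
  have h1 : 0 ≤ o.1*o.1 := mul_self_nonneg _
  have h2 : 0 ≤ o.2*o.2 := mul_self_nonneg _
  unfold pvStepA
  by_cases ha : o.2*o.2 + o.1*o.1 = 0 ∨ o.2*o.2 + o.1*o.1 > r*r
  · rw [if_pos ha]
    have hp : pvPref r o = false := by
      simp only [pvPref, decide_eq_false_iff_not]; omega
    simp [hp]
  · rw [if_neg ha]
    by_cases hb : ix0 + o.2 < 0 ∨ ix0 + o.2 ≥ nx ∨ iy0 + o.1 < 0 ∨ iy0 + o.1 ≥ ny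
    · rw [if_pos hb]
      have hg : pvGood mask nx ny ix0 iy0 o = false := by
        simp only [pvGood, Bool.and_eq_false_iff]
        left; simp only [decide_eq_false_iff_not]; omega
      simp [hg]
    · rw [if_neg hb]
      by_cases hc : pvGridAt mask (iy0 + o.1) (ix0 + o.2) = true
      · have hg : pvGood mask nx ny ix0 iy0 o = true := by
          simp only [pvGood, Bool.and_eq_true, decide_eq_true_iff, hc]
          exact ⟨by omega, trivial⟩
        have hp : pvPref r o = true := by
          simp only [pvPref, decide_eq_true_iff]
          have h3 : 0 ≤ o.1*o.1 := mul_self_nonneg _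
          have h4 : 0 ≤ o.2*o.2 := mul_self_nonneg _
          omega
        rw [if_neg (by simp [hc]), hg, hp]
        simp only [Bool.and_self, if_true]
        unfold pvUpd
        rfl
      · have hg : pvGood mask nx ny ix0 iy0 o = false := by
          simp only [pvGood, Bool.and_eq_false_iff]
          right; simpa using hc
        rw [if_pos (by simpa using hc)]
        simp [hg]

-- the encoded key orders triples lexicographically
theorem pvLexEnc (Bv x1 y1 z1 x2 y2 z2 : Int)
    (hy1 : 0 ≤ y1) (hy1' : y1 < Bv) (hz1 : 0 ≤ z1) (hz1' : z1 < Bv)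
    (hy2 : 0 ≤ y2) (hy2' : y2 < Bv) (hz2 : 0 ≤ z2) (hz2' : z2 < Bv) :
    x1*Bv*Bv + y1*Bv + z1 < x2*Bv*Bv + y2*Bv + z2 ↔
      (x1 < x2 ∨ (x1 = x2 ∧ (y1 < y2 ∨ (y1 = y2 ∧ z1 < z2)))) := by
  have hB : 0 < Bv := by omega
  have aux : ∀ a1 b1 c1 a2 b2 c2 : Int, 0 ≤ b1 → b1 < Bv → 0 ≤ c1 → c1 < Bv →
      0 ≤ b2 → b2 < Bv → 0 ≤ c2 → c2 < Bv →
      (a1 < a2 ∨ (a1 = a2 ∧ (b1 < b2 ∨ (b1 = b2 ∧ c1 < c2)))) →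
      a1*Bv*Bv + b1*Bv + c1 < a2*Bv*Bv + b2*Bv + c2 := by
    rintro a1 b1 c1 a2 b2 c2 hb1 hb1' hc1 hc1' hb2 hb2' hc2 hc2' (h | ⟨rfl, h | ⟨rfl, h⟩⟩)
    · have e1 : Bv*Bv ≤ (a2 - a1)*Bv*Bv := by nlinarith
      have e2 : b1*Bv + c1 < Bv*Bv := by nlinarith
      have e3 : 0 ≤ b2*Bv + c2 := by positivity
      nlinarith [e1, e2, e3]
    · have e1 : Bv ≤ (b2 - b1)*Bv := by nlinarith
      nlinarith [e1]
    · linarith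
  constructor
  · intro h
    rcases lt_trichotomy x1 x2 with hx | hx | hx
    · exact Or.inl hx
    · subst hx
      rcases lt_trichotomy y1 y2 with hy | hy | hy
      · exact Or.inr ⟨rfl, Or.inl hy⟩
      · subst hy
        rcases lt_trichotomy z1 z2 with hz | hz | hz
        · exact Or.inr ⟨rfl, Or.inr ⟨rfl, hz⟩⟩
        · subst hz; exact absurd h (lt_irrefl _)
        · exfalso
          have := aux x1 y1 z2 x1 y1 z1 hy1 hy1' hz2 hz2' hy1 hy1' hz1 hz1'
            (Or.inr ⟨rfl, Or.inr ⟨rfl, hz⟩⟩)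
          linarith
      · exfalso
        have := aux x1 y2 z2 x1 y1 z1 hy2 hy2' hz2 hz2' hy1 hy1' hz1 hz1'
          (Or.inr ⟨rfl, Or.inl hy⟩)
        linarith
    · exfalso
      have := aux x2 y2 z2 x1 y1 z1 hy2 hy2' hz2 hz2' hy1 hy1' hz1 hz1' (Or.inl hx)
      linarith
  · exact aux x1 y1 z1 x2 y2 z2 hy1 hy1' hz1 hz1' hy2 hy2' hz2 hz2'

theorem pvE_lt_iff (r : Int) (a b : Int × Int) (ha : pvBnd r a) (hb : pvBnd r b) :
    pvE r a < pvE r b ↔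
      (pvD2 a < pvD2 b ∨ (pvD2 a = pvD2 b ∧ (a.1 < b.1 ∨ (a.1 = b.1 ∧ a.2 < b.2)))) := by
  obtain ⟨h1, h2, h3, h4⟩ := ha
  obtain ⟨h5, h6, h7, h8⟩ := hb
  have := pvLexEnc (2*r+1) (pvD2 a) (a.1+r) (a.2+r) (pvD2 b) (b.1+r) (b.2+r)
    (by omega) (by omega) (by omega) (by omega) (by omega) (by omega) (by omega) (by omega)
  simp only [pvE, pvD2] at *
  constructor
  · intro h; have := this.mp h; omega
  · intro h; exact this.mpr (by omega)

theorem pvE_inj (r : Int) (a b : Int × Int) (ha : pvBnd r a) (hb : pvBnd r b)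
    (h : pvE r a = pvE r b) : a = b := by
  by_contra hne
  have hcases : pvE r a < pvE r b ∨ pvE r b < pvE r a := by
    rcases Prod.mk.injEq a.1 a.2 b.1 b.2 ▸ hne with _
    have h1 := pvE_lt_iff r a b ha hb
    have h2 := pvE_lt_iff r b a hb ha
    have : a.1 ≠ b.1 ∨ a.2 ≠ b.2 := by
      by_contra hc; push_neg at hc
      exact hne (Prod.ext hc.1 hc.2)
    rcases lt_trichotomy (pvD2 a) (pvD2 b) with hd | hd | hd
    · exact Or.inl (h1.mpr (Or.inl hd))
    · rcases lt_trichotomy a.1 b.1 with hy | hy | hy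
      · exact Or.inl (h1.mpr (Or.inr ⟨hd, Or.inl hy⟩))
      · rcases lt_trichotomy a.2 b.2 with hz | hz | hz
        · exact Or.inl (h1.mpr (Or.inr ⟨hd, Or.inr ⟨hy, hz⟩⟩))
        · exact absurd (Prod.ext hy hz) hne
        · exact Or.inr (h2.mpr (Or.inr ⟨hd.symm, Or.inr ⟨hy.symm, hz⟩⟩))
      · exact Or.inr (h2.mpr (Or.inr ⟨hd.symm, Or.inl hy⟩))
    · exact Or.inr (h2.mpr (Or.inl hd))
  omega

theorem pvMem_L0 (r : Int) (o : Int × Int) : o ∈ pvL0 r ↔ pvBnd r o := by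
  simp only [pvL0, List.mem_flatMap, List.mem_map, PySem.List.mem_pyRange_one, pvBnd]
  constructor
  · rintro ⟨dy, hdy, dx, hdx, rfl⟩; dsimp; omega
  · intro h
    exact ⟨o.1, by omega, o.2, by omega, rfl⟩

theorem pvUpd_some_eq (ix0 iy0 r : Int) (b o : Int × Int) (hb : pvBnd r b) (ho : pvBnd r o) :
    pvUpd ix0 iy0 (some (ix0 + b.2, iy0 + b.1), some (b.2*b.2 + b.1*b.1)) o
      = if pvE r o < pvE r b then (some (ix0 + o.2, iy0 + o.1), some (o.2*o.2 + o.1*o.1))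
        else (some (ix0 + b.2, iy0 + b.1), some (b.2*b.2 + b.1*b.1)) := by
  have hiff := pvE_lt_iff r o b ho hb
  simp only [pvD2] at hiff
  unfold pvUpd
  by_cases h : pvE r o < pvE r b
  · rw [if_pos h]
    have hlex := hiff.mp h
    have hc : ((decide (o.2*o.2 + o.1*o.1 < b.2*b.2 + b.1*b.1)) ||
        ((decide (o.2*o.2 + o.1*o.1 = b.2*b.2 + b.1*b.1)) &&
         (decide (iy0 + o.1 < iy0 + b.1 ∨ (iy0 + o.1 = iy0 + b.1 ∧ ix0 + o.2 < ix0 + b.2))))) = true := by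
      simp only [Bool.or_eq_true, Bool.and_eq_true, decide_eq_true_iff]
      omega
    simp only [hc, if_true]
  · rw [if_neg h]
    have hlex : ¬ (o.2*o.2 + o.1*o.1 < b.2*b.2 + b.1*b.1 ∨
        (o.2*o.2 + o.1*o.1 = b.2*b.2 + b.1*b.1 ∧ (o.1 < b.1 ∨ (o.1 = b.1 ∧ o.2 < b.2)))) :=
      fun hcon => h (hiff.mpr hcon)
    have hc : ((decide (o.2*o.2 + o.1*o.1 < b.2*b.2 + b.1*b.1)) ||
        ((decide (o.2*o.2 + o.1*o.1 = b.2*b.2 + b.1*b.1)) &&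
         (decide (iy0 + o.1 < iy0 + b.1 ∨ (iy0 + o.1 = iy0 + b.1 ∧ ix0 + o.2 < ix0 + b.2))))) = false := by
      simp only [Bool.or_eq_false_iff, Bool.and_eq_false_iff, decide_eq_false_iff_not]
      omega
    simp only [hc, Bool.false_eq_true, if_false]

theorem pvMin_cons (r : Int) (b o : Int × Int) (l : List (Int × Int)) :
    pvMin r b (o :: l) = pvMin r (if pvE r o < pvE r b then o else b) l := rfl

theorem pvFoldUpd_some (ix0 iy0 r : Int) (l : List (Int × Int)) (b : Int × Int)
    (hb : pvBnd r b) (hl : ∀ o ∈ l, pvBnd r o) :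
    l.foldl (pvUpd ix0 iy0) (some (ix0 + b.2, iy0 + b.1), some (b.2*b.2 + b.1*b.1))
      = (some (ix0 + (pvMin r b l).2, iy0 + (pvMin r b l).1),
         some ((pvMin r b l).2*(pvMin r b l).2 + (pvMin r b l).1*(pvMin r b l).1)) := by
  induction l generalizing b with
  | nil => simp [pvMin]
  | cons o t ih =>
    have ho : pvBnd r o := hl o (by simp)
    have ht : ∀ x ∈ t, pvBnd r x := fun x hx => hl x (by simp [hx])
    rw [List.foldl_cons, pvUpd_some_eq ix0 iy0 r b o hb ho, pvMin_cons]
    by_cases h : pvE r o < pvE r b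
    · rw [if_pos h, if_pos h]; exact ih o ho ht
    · rw [if_neg h, if_neg h]; exact ih b hb ht

theorem pvUpd_none (ix0 iy0 : Int) (o : Int × Int) :
    pvUpd ix0 iy0 (none, none) o = (some (ix0 + o.2, iy0 + o.1), some (o.2*o.2 + o.1*o.1)) := by
  simp [pvUpd]

def pvSel (ix0 iy0 r : Int) (l : List (Int × Int)) : Option (Int × Int) × Option Int :=
  match l with
  | [] => (none, none)
  | h :: t => (some (ix0 + (pvMin r h t).2, iy0 + (pvMin r h t).1),
               some ((pvMin r h t).2*(pvMin r h t).2 + (pvMin r h t).1*(pvMin r h t).1))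

theorem pvFoldUpd_none (ix0 iy0 r : Int) (l : List (Int × Int)) (hl : ∀ o ∈ l, pvBnd r o) :
    l.foldl (pvUpd ix0 iy0) (none, none) = pvSel ix0 iy0 r l := by
  cases l with
  | nil => rfl
  | cons h t =>
    rw [List.foldl_cons, pvUpd_none]
    exact pvFoldUpd_some ix0 iy0 r t h (hl h (by simp)) (fun x hx => hl x (by simp [hx]))

theorem pvMin_cases (r : Int) (b : Int × Int) (l : List (Int × Int)) :
    pvMin r b l = b ∨ pvMin r b l ∈ l := by
  induction l generalizing b with
  | nil => exact Or.inl rfl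
  | cons o t ih =>
    rw [pvMin_cons]
    by_cases h : pvE r o < pvE r b
    · rw [if_pos h]
      rcases ih o with h' | h'
      · exact Or.inr (by simp [h'])
      · exact Or.inr (by simp [h'])
    · rw [if_neg h]
      rcases ih b with h' | h'
      · exact Or.inl h'
      · exact Or.inr (by simp [h'])

theorem pvMin_le (r : Int) (b : Int × Int) (l : List (Int × Int)) :
    ∀ c, (c = b ∨ c ∈ l) → pvE r (pvMin r b l) ≤ pvE r c := by
  induction l generalizing b with
  | nil =>
    rintro c (rfl | hc)
    · exact le_refl _
    · simp at hc
  | cons o t ih =>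
    rintro c (rfl | hc)
    · rw [pvMin_cons]
      by_cases h : pvE r o < pvE r c
      · rw [if_pos h]; exact le_trans (ih o o (Or.inl rfl)) h.le
      · rw [if_neg h]; exact ih c c (Or.inl rfl)
    · rcases List.mem_cons.mp hc with rfl | hct
      · rw [pvMin_cons]
        by_cases h : pvE r c < pvE r b
        · rw [if_pos h]; exact ih c c (Or.inl rfl)
        · rw [if_neg h]
          exact le_trans (ih b b (Or.inl rfl)) (by omega)
      · rw [pvMin_cons]
        by_cases h : pvE r o < pvE r b
        · rw [if_pos h]; exact ih o c (Or.inr hct)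
        · rw [if_neg h]; exact ih b c (Or.inr hct)

theorem pvFind_first (r : Int) (p : Int × Int → Bool) (s : List (Int × Int)) (f : Int × Int)
    (hp : s.Pairwise (fun a b => pvE r a ≤ pvE r b)) (hf : s.find? p = some f) :
    ∀ x ∈ s, p x = true → pvE r f ≤ pvE r x := by
  induction s with
  | nil => simp at hf
  | cons a t ih =>
    intro x hx hpx
    rw [List.find?_cons] at hf
    rcases List.mem_cons.mp hx with rfl | hxt
    · cases hpa : p x with
      | true => simp [hpa] at hf; subst hf; exact le_refl _
      | false => rw [hpx] at hpa; exact absurd hpa (by simp)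
    · cases hpa : p a with
      | true =>
        simp [hpa] at hf; subst hf
        exact (List.pairwise_cons.mp hp).1 x hxt
      | false =>
        simp [hpa] at hf
        exact ih (List.pairwise_cons.mp hp).2 hf x hxt hpx



set_option maxHeartbeats 1000000

-- the search loop of A and the sorted-scan of B pick the same cell
theorem pvCore (mask : List (List Bool)) (cell : Int × Int) (nx ny ix0 iy0 r : Int) :
    (match ((PySem.List.pyRange (-r) (r+1) 1).foldl (fun st dy =>
        (PySem.List.pyRange (-r) (r+1) 1).foldl (fun st dx =>
          pvStepA mask nx ny ix0 iy0 r st (dy, dx)) st)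
        ((none, none) : Option (Int × Int) × Option Int)).1 with
     | none => (cell, false)
     | some b => (b, true))
    = (match (((pvL0 r).filter (pvPref r)).mergeSort (pvLe r)).find?
          (pvGood mask nx ny ix0 iy0) with
       | none => (cell, false)
       | some o => ((ix0 + o.2, iy0 + o.1), true)) := by
  have hbnds : ∀ o ∈ (pvL0 r).filter (fun o => pvPref r o && pvGood mask nx ny ix0 iy0 o),
      pvBnd r o := fun o ho => (pvMem_L0 r o).mp (List.mem_of_mem_filter ho)
  have hfg : (pvStepA mask nx ny ix0 iy0 r) =
      (fun st o => if pvPref r o && pvGood mask nx ny ix0 iy0 o then pvUpd ix0 iy0 st o else st) :=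
    funext₂ (pvStepA_shape mask nx ny ix0 iy0 r)
  have h1 : ((PySem.List.pyRange (-r) (r+1) 1).foldl (fun st dy =>
        (PySem.List.pyRange (-r) (r+1) 1).foldl (fun st dx =>
          pvStepA mask nx ny ix0 iy0 r st (dy, dx)) st)
        ((none, none) : Option (Int × Int) × Option Int))
      = ((pvL0 r).filter (fun o => pvPref r o && pvGood mask nx ny ix0 iy0 o)).foldl
          (pvUpd ix0 iy0) (none, none) := by
    rw [pvFoldl_prod (PySem.List.pyRange (-r) (r+1) 1) (PySem.List.pyRange (-r) (r+1) 1)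
        (pvStepA mask nx ny ix0 iy0 r) ((none, none) : Option (Int × Int) × Option Int)]
    rw [show ((PySem.List.pyRange (-r) (r+1) 1).flatMap
        (fun b => (PySem.List.pyRange (-r) (r+1) 1).map (fun c => (b, c)))) = pvL0 r from rfl]
    rw [hfg, List.foldl_filter]
  rw [h1, pvFoldUpd_none ix0 iy0 r _ hbnds]
  clear hbnds hfg h1
  rcases hF : (pvL0 r).filter (fun o => pvPref r o && pvGood mask nx ny ix0 iy0 o) with _ | ⟨h, t⟩
  all_goals simp only [pvSel]
  · have hnone : (((pvL0 r).filter (pvPref r)).mergeSort (pvLe r)).find?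
        (pvGood mask nx ny ix0 iy0) = none := by
      rw [List.find?_eq_none]
      intro x hx hgx
      have hxo : x ∈ (pvL0 r).filter (pvPref r) :=
        (List.mergeSort_perm ((pvL0 r).filter (pvPref r)) (pvLe r)).mem_iff.mp hx
      obtain ⟨hxL0, hxpref⟩ := List.mem_filter.mp hxo
      have hxF : x ∈ (pvL0 r).filter (fun o => pvPref r o && pvGood mask nx ny ix0 iy0 o) :=
        List.mem_filter.mpr ⟨hxL0, by rw [Bool.and_eq_true]; exact ⟨hxpref, hgx⟩⟩
      rw [hF] at hxF
      simp at hxF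
    rw [hnone]
  · have hmmem : pvMin r h t = h ∨ pvMin r h t ∈ t := pvMin_cases r h t
    have hmF : pvMin r h t ∈ (pvL0 r).filter (fun o => pvPref r o && pvGood mask nx ny ix0 iy0 o) := by
      rw [hF]
      rcases hmmem with h' | h'
      · rw [h']; exact List.mem_cons_self
      · exact List.mem_cons_of_mem _ h'
    obtain ⟨hmL0, hmpass⟩ := List.mem_filter.mp hmF
    rw [Bool.and_eq_true] at hmpass
    have hmoff : pvMin r h t ∈ (pvL0 r).filter (pvPref r) :=
      List.mem_filter.mpr ⟨hmL0, hmpass.1⟩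
    have hms : pvMin r h t ∈ ((pvL0 r).filter (pvPref r)).mergeSort (pvLe r) :=
      (List.mergeSort_perm ((pvL0 r).filter (pvPref r)) (pvLe r)).mem_iff.mpr hmoff
    cases hfind : (((pvL0 r).filter (pvPref r)).mergeSort (pvLe r)).find?
        (pvGood mask nx ny ix0 iy0) with
    | none =>
      exfalso
      rw [List.find?_eq_none] at hfind
      exact hfind _ hms hmpass.2
    | some f =>
      have hf_good : pvGood mask nx ny ix0 iy0 f = true := List.find?_some hfind
      have hf_s : f ∈ ((pvL0 r).filter (pvPref r)).mergeSort (pvLe r) :=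
        List.mem_of_find?_eq_some hfind
      have hf_off : f ∈ (pvL0 r).filter (pvPref r) :=
        (List.mergeSort_perm ((pvL0 r).filter (pvPref r)) (pvLe r)).mem_iff.mp hf_s
      obtain ⟨hfL0, hfpref⟩ := List.mem_filter.mp hf_off
      have hfF : f ∈ (pvL0 r).filter (fun o => pvPref r o && pvGood mask nx ny ix0 iy0 o) :=
        List.mem_filter.mpr ⟨hfL0, by rw [Bool.and_eq_true]; exact ⟨hfpref, hf_good⟩⟩
      rw [hF] at hfF
      have h_mf : pvE r (pvMin r h t) ≤ pvE r f := by
        rcases List.mem_cons.mp hfF with h' | h'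
        · exact pvMin_le r h t f (Or.inl h')
        · exact pvMin_le r h t f (Or.inr h')
      have hpair : (((pvL0 r).filter (pvPref r)).mergeSort (pvLe r)).Pairwise
          (fun a b => pvE r a ≤ pvE r b) := by
        have htrans : ∀ a b c : Int × Int, pvLe r a b = true → pvLe r b c = true →
            pvLe r a c = true := by
          intro a b c hab hbc
          simp only [pvLe, decide_eq_true_iff] at *
          omega
        have htot : ∀ a b : Int × Int, (pvLe r a b || pvLe r b a) = true := by
          intro a b
          simp only [pvLe, Bool.or_eq_true, decide_eq_true_iff]
          omega
        exact (List.pairwise_mergeSort htrans htot ((pvL0 r).filter (pvPref r))).imp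
          (fun h => by simpa [pvLe, decide_eq_true_iff] using h)
      have h_fm : pvE r f ≤ pvE r (pvMin r h t) :=
        pvFind_first r (pvGood mask nx ny ix0 iy0) _ f hpair hfind (pvMin r h t) hms hmpass.2
      have hmf : pvMin r h t = f :=
        pvE_inj r (pvMin r h t) f ((pvMem_L0 r _).mp hmL0) ((pvMem_L0 r f).mp hfL0)
          (le_antisymm h_mf h_fm)
      rw [← hmf]

theorem pvMain (cell : Int × Int) (mask : List (List Bool)) (mr : Int) :
    snap_cell_to_free_py cell mask mr = snap_cell_to_free_py_alt cell mask mr := by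
  unfold snap_cell_to_free_py snap_cell_to_free_py_alt
  simp only []
  split_ifs <;>
    first
      | rfl
      | exact pvCore mask cell _ _ cell.1 cell.2 (max 0 mr)

-- ===== VERDICT (by name: the statement is the Claim_ definition above) =====
theorem snap_cell_to_free_py_spec : Claim_equal_snap_cell_to_free_py := by
  intro cell mask mr _ _
  unfold Spec_snap_cell_to_free_py
  exact pvMain cell mask mr
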